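-- pv_equiv track=rewrite | github.com/bruiken/AoC2022 | day08/day8.1.py | create_max_map_2d
-- ===== SOURCE A (Python) =====
-- def create_max_map_2d(trees):
--     left, right = 0, len(trees)-1
--     result = list(trees)
--     while left < right - 1:
--         if result[left] < result[right]:
--             left += 1
--             result[left] = max(result[left], result[left-1])
--         else:
--             right -= 1
--             result[right] = max(result[right], result[right+1])
--     return result
-- ===== SOURCE B (Python) =====
-- def create_max_map_2d(trees):
--     pre = []
--     m = None
--     for x in trees:
--         m = x if m is None or x > m else m
--         pre.append(m)
--     suf = []
--     m = None
--     for x in reversed(trees):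
--         m = x if m is None or x > m else m
--         suf.append(m)
--     suf.reverse()
--     return [min(p, s) for p, s in zip(pre, suf)]
-- ===== Notes on version B (the rewrite author's own statement) =====
-- stated objective: simpler
-- what changed: Replaces A's interleaved two-pointer convergence loop that mutates one array in place with two independent running-max scans (prefix max and suffix max) combined pointwise by min, computing each output index directly.
import Mathlib
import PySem

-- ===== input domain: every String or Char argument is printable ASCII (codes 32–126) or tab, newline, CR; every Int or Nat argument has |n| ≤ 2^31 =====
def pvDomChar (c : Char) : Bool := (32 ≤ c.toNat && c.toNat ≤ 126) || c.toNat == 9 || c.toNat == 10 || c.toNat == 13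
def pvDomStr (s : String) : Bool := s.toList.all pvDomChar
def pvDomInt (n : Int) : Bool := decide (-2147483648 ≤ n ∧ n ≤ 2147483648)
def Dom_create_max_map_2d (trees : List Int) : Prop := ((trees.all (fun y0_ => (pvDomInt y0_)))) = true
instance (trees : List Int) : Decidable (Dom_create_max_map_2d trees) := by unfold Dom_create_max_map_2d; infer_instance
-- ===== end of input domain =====

-- B replaces A's interleaved two-pointer in-place convergence loop with two running-max
-- scans (prefix and suffix max) combined pointwise by min; same cost, plainer structure.

-- ===== PORT A =====
-- the while loop: state (result, left, right); pyGetD/pySetD are the total forms of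
-- Python indexing (every index A uses is in range, so they are exact here)
def createMaxLoopA (result : List Int) (left right : Int) : List Int :=
  if _h : left < right - 1 then
    if PySem.List.pyGetD result left 0 < PySem.List.pyGetD result right 0 then
      createMaxLoopA
        (PySem.List.pySetD result (left + 1)
          (max (PySem.List.pyGetD result (left + 1) 0)
            (PySem.List.pyGetD result (left + 1 - 1) 0)))
        (left + 1) right
    else
      createMaxLoopA
        (PySem.List.pySetD result (right - 1)
          (max (PySem.List.pyGetD result (right - 1) 0)
            (PySem.List.pyGetD result (right - 1 + 1) 0)))
        left (right - 1)
  else result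
termination_by (right - left).toNat
decreasing_by all_goals omega

def create_max_map_2d (trees : List Int) : List Int :=
  createMaxLoopA trees 0 ((trees.length : Int) - 1)

-- ===== PORT B =====
-- running-max scan: the 'for x in …: m = x if m is None or x > m else m; out.append(m)' loop
def scanMaxB : List Int → Option Int → List Int
  | [], _ => []
  | x :: xs, m =>
      let m' := match m with
        | none => x
        | some mm => if x > mm then x else mm
      m' :: scanMaxB xs (some m')

def create_max_map_2d_alt (trees : List Int) : List Int :=
  let pre := scanMaxB trees none
  let suf := (scanMaxB trees.reverse none).reverse
  (pre.zip suf).map (fun p => min p.1 p.2)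

-- ===== PRECONDITION & SPEC =====
def Spec_create_max_map_2d (trees : List Int) (out : List Int) : Prop := out = create_max_map_2d_alt trees
instance (trees : List Int) (out : List Int) : Decidable (Spec_create_max_map_2d trees out) := by unfold Spec_create_max_map_2d; infer_instance

-- ===== CLAIM (what is proved, stated in full; the proofs are below) =====
def Claim_equal_create_max_map_2d : Prop := ∀ (trees : List Int), Dom_create_max_map_2d trees → Spec_create_max_map_2d trees (create_max_map_2d trees)

-- ===== LEMMAS AND PROOFS =====

-- max of a nonempty list (0 for []); pmax/smax: max of xs[0..i] / xs[i..]
def nmax : List Int → Int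
  | [] => 0
  | y :: ys => ys.foldl max y

def pmax (xs : List Int) (i : Nat) : Int := nmax (xs.take (i + 1))
def smax (xs : List Int) (i : Nat) : Int := nmax (xs.drop i)

lemma getD_set (xs : List Int) (j i : Nat) (v : Int) (hj : j < xs.length) :
    (xs.set j v).getD i 0 = if i = j then v else xs.getD i 0 := by
  simp only [List.getD_eq_getElem?_getD, List.getElem?_set]
  rcases eq_or_ne i j with rfl | hne
  · simp [hj]
  · simp [hne, Ne.symm hne]

lemma nmax_cons (y : Int) (l : List Int) (hl : l ≠ []) :
    nmax (y :: l) = max y (nmax l) := by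
  rcases l with _ | ⟨z, zs⟩
  · exact absurd rfl hl
  · show (z :: zs).foldl max y = max y (zs.foldl max z)
    rw [List.foldl_cons]
    exact List.foldl_assoc

lemma nmax_append_singleton (l : List Int) (x : Int) (hl : l ≠ []) :
    nmax (l ++ [x]) = max (nmax l) x := by
  rcases l with _ | ⟨y, ys⟩
  · exact absurd rfl hl
  · show (ys ++ [x]).foldl max y = max (ys.foldl max y) x
    simp [List.foldl_append]

lemma mem_le_nmax {x : Int} {l : List Int} (h : x ∈ l) : x ≤ nmax l := by
  rcases l with _ | ⟨y, ys⟩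
  · simp at h
  · rcases List.mem_cons.mp h with rfl | hm
    · exact (PySem.List.le_foldl_max ys x).1
    · exact (PySem.List.le_foldl_max ys y).2 x hm

lemma nmax_mem {l : List Int} (hl : l ≠ []) : nmax l ∈ l := by
  rcases l with _ | ⟨y, ys⟩
  · exact absurd rfl hl
  · rcases PySem.List.foldl_max_mem ys y with h | h
    · have hy : nmax (y :: ys) = y := h
      rw [hy]; exact List.mem_cons_self
    · exact List.mem_cons_of_mem _ h

lemma nmax_le_of_sublist {l m : List Int} (h : List.Sublist l m) (hl : l ≠ []) :
    nmax l ≤ nmax m := mem_le_nmax (h.mem (nmax_mem hl))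

lemma nmax_reverse (l : List Int) : nmax l.reverse = nmax l := by
  rcases eq_or_ne l [] with rfl | hl
  · rfl
  · have hr : l.reverse ≠ [] := by simpa using hl
    exact le_antisymm (mem_le_nmax (List.mem_reverse.mp (nmax_mem hr)))
      (mem_le_nmax (List.mem_reverse.mpr (nmax_mem hl)))

lemma pmax_zero (xs : List Int) (hl : xs ≠ []) : pmax xs 0 = xs.getD 0 0 := by
  rcases xs with _ | ⟨x, t⟩
  · exact absurd rfl hl
  · rfl

lemma take_nonempty (xs : List Int) (i : Nat) (h : i < xs.length) :
    xs.take (i + 1) ≠ [] := by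
  intro hc
  have : (xs.take (i + 1)).length = min (i + 1) xs.length := List.length_take
  rw [hc] at this; simp at this; omega

lemma pmax_succ (xs : List Int) (i : Nat) (h : i + 1 < xs.length) :
    pmax xs (i + 1) = max (pmax xs i) (xs.getD (i + 1) 0) := by
  unfold pmax
  rw [List.take_add_one, List.getElem?_eq_getElem h, List.getD_eq_getElem _ _ h]
  exact nmax_append_singleton _ _ (take_nonempty xs i (by omega))

lemma drop_nonempty (xs : List Int) (i : Nat) (h : i < xs.length) :
    xs.drop i ≠ [] := by
  intro hc
  have := List.length_drop (l := xs) (i := i)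
  rw [hc] at this; simp at this; omega

lemma smax_eq (xs : List Int) (i : Nat) (h : i + 1 < xs.length) :
    smax xs i = max (xs.getD i 0) (smax xs (i + 1)) := by
  unfold smax
  rw [List.drop_eq_getElem_cons (by omega : i < xs.length),
    List.getD_eq_getElem _ _ (by omega)]
  exact nmax_cons _ _ (drop_nonempty xs (i + 1) h)

lemma smax_last (xs : List Int) (n : Nat) (h : xs.length = n) (h1 : 1 ≤ n) :
    smax xs (n - 1) = xs.getD (n - 1) 0 := by
  unfold smax
  rw [List.drop_eq_getElem_cons (by omega), List.getD_eq_getElem _ _ (by omega)]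
  have h2 : n - 1 + 1 = n := by omega
  rw [h2, List.drop_of_length_le (by omega)]
  rfl

lemma pmax_mono (xs : List Int) {i j : Nat} (hij : i ≤ j) :
    pmax xs i ≤ pmax xs j := by
  rcases Nat.lt_or_ge i xs.length with h | h
  · apply nmax_le_of_sublist _ (take_nonempty xs i h)
    rw [show xs.take (i+1) = (xs.take (j+1)).take (i+1) by
      rw [List.take_take]; congr 1; omega]
    exact List.take_sublist _ _
  · unfold pmax
    rw [List.take_of_length_le (by omega), List.take_of_length_le (by omega)]

lemma smax_anti (xs : List Int) {i j : Nat} (hij : i ≤ j) (hj : j < xs.length) :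
    smax xs j ≤ smax xs i := by
  apply nmax_le_of_sublist _ (drop_nonempty xs j hj)
  rw [show xs.drop j = (xs.drop i).drop (j - i) by rw [List.drop_drop]; congr 1; omega]
  exact List.drop_sublist _ _

lemma getD_le_pmax (xs : List Int) (i : Nat) (h : i < xs.length) :
    xs.getD i 0 ≤ pmax xs i := by
  apply mem_le_nmax
  rw [List.getD_eq_getElem _ _ h,
    show xs[i] = (xs.take (i+1))[i]'(by simp; omega) from (List.getElem_take ..).symm]
  exact List.getElem_mem _

lemma getD_le_smax (xs : List Int) (i : Nat) (h : i < xs.length) :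
    xs.getD i 0 ≤ smax xs i := by
  apply mem_le_nmax
  rw [List.getD_eq_getElem _ _ h, List.drop_eq_getElem_cons h]
  exact List.mem_cons_self

-- ===== B-side characterisation =====

lemma scan_length (xs : List Int) (m : Option Int) :
    (scanMaxB xs m).length = xs.length := by
  induction xs generalizing m with
  | nil => rfl
  | cons x t ih => simp [scanMaxB, ih]

lemma if_gt_eq_max (x m : Int) : (if x > m then x else m) = max m x := by
  split <;> omega

lemma scan_getD_some (xs : List Int) :
    ∀ (i : Nat) (m : Int), i < xs.length →
      (scanMaxB xs (some m)).getD i 0 = max m (pmax xs i) := by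
  induction xs with
  | nil => intro i m h; simp at h
  | cons x t ih =>
    intro i m h
    rcases i with _ | i
    · show (if x > m then x else m) = max m (pmax (x :: t) 0)
      rw [if_gt_eq_max, pmax_zero _ (by simp)]; rfl
    · have ht : i < t.length := by simpa using h
      show (scanMaxB t (some (if x > m then x else m))).getD i 0 = _
      rw [if_gt_eq_max, ih i (max m x) ht]
      have : pmax (x :: t) (i + 1) = max x (pmax t i) := by
        unfold pmax
        rw [List.take_succ_cons]
        exact nmax_cons _ _ (take_nonempty t i ht)
      rw [this, max_assoc]

lemma scan_getD_none (xs : List Int) (i : Nat) (h : i < xs.length) :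
    (scanMaxB xs none).getD i 0 = pmax xs i := by
  rcases xs with _ | ⟨x, t⟩
  · simp at h
  · rcases i with _ | i
    · show x = pmax (x :: t) 0
      rw [pmax_zero _ (by simp)]; rfl
    · have ht : i < t.length := by simpa using h
      show (scanMaxB t (some x)).getD i 0 = _
      rw [scan_getD_some t i x ht]
      unfold pmax
      rw [List.take_succ_cons]
      exact (nmax_cons _ _ (take_nonempty t i ht)).symm

lemma alt_length (xs : List Int) :
    (create_max_map_2d_alt xs).length = xs.length := by
  simp [create_max_map_2d_alt, scan_length]

lemma alt_getD (xs : List Int) (i : Nat) (h : i < xs.length) :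
    (create_max_map_2d_alt xs).getD i 0 = min (pmax xs i) (smax xs i) := by
  have hlen : (create_max_map_2d_alt xs).length = xs.length := alt_length xs
  have hpre : (scanMaxB xs none).length = xs.length := scan_length xs none
  have hsufl : ((scanMaxB xs.reverse none).reverse).length = xs.length := by
    simp [scan_length]
  rw [List.getD_eq_getElem _ _ (by omega)]
  unfold create_max_map_2d_alt
  simp only [List.getElem_map, List.getElem_zip]
  have h1 : (scanMaxB xs none)[i]'(by omega) = pmax xs i := by
    rw [← List.getD_eq_getElem _ 0 (by omega)]
    exact scan_getD_none xs i h
  have h2 : ((scanMaxB xs.reverse none).reverse)[i]'(by omega) = smax xs i := by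
    rw [List.getElem_reverse]
    have hlr : (scanMaxB xs.reverse none).length = xs.length := by
      simp [scan_length]
    rw [← List.getD_eq_getElem _ 0 (by omega)]
    have hxr : xs.reverse.length = xs.length := by simp
    rw [scan_getD_none xs.reverse _ (by omega)]
    unfold pmax smax
    rw [show (scanMaxB xs.reverse none).length - 1 - i + 1 = xs.length - i by omega]
    rw [List.take_reverse, nmax_reverse]
    congr 2
    omega
  rw [h1, h2]

-- ===== A-side loop invariant =====

lemma loopA_eq (xs : List Int) (k : Nat) :
    ∀ (l r : Nat) (res : List Int),
    r - l = k →
    res.length = xs.length →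
    l < r → r < xs.length →
    (∀ i, l < i → i < r → res.getD i 0 = xs.getD i 0) →
    res.getD l 0 = pmax xs l →
    res.getD r 0 = smax xs r →
    pmax xs l ≤ smax xs l →
    smax xs r ≤ pmax xs r →
    (∀ i, i < l → res.getD i 0 = min (pmax xs i) (smax xs i)) →
    (∀ i, r < i → i < xs.length → res.getD i 0 = min (pmax xs i) (smax xs i)) →
    createMaxLoopA res (l : Int) (r : Int) = create_max_map_2d_alt xs := by
  induction k with
  | zero =>
    intro l r res hk _ hlr _ _ _ _ _ _ _ _
    omega
  | succ k ih =>
    intro l r res hk hlen hlr hr hmid hl hrr hpls hsrp hlo hhi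
    rcases Nat.lt_or_ge (l + 1) r with hstep | hexit
    · -- loop body runs
      rw [createMaxLoopA, dif_pos (by omega : (l : Int) < (r : Int) - 1)]
      have e1 : (l : Int) + 1 = ((l + 1 : Nat) : Int) := by omega
      rw [e1]
      have e3 : ((l + 1 : Nat) : Int) - 1 = (l : Int) := by omega
      rw [e3]
      simp only [PySem.List.pyGetD_natCast, PySem.List.pySetD_natCast]
      rw [hl, hrr]
      by_cases hcond : pmax xs l < smax xs r
      · rw [if_pos hcond]
        have hv : max (res.getD (l + 1) 0) (pmax xs l) = pmax xs (l + 1) := by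
          rw [hmid (l + 1) (by omega) (by omega), pmax_succ xs l (by omega), max_comm]
        rw [hv]
        refine ih (l + 1) r (res.set (l + 1) (pmax xs (l + 1))) (by omega)
          (by rw [List.length_set]; exact hlen) hstep hr ?_ ?_ ?_ ?_ hsrp ?_ ?_
        · intro i h1 h2
          rw [getD_set res (l + 1) i _ (by omega), if_neg (by omega)]
          exact hmid i (by omega) h2
        · rw [getD_set res (l + 1) (l + 1) _ (by omega), if_pos rfl]
        · rw [getD_set res (l + 1) r _ (by omega), if_neg (by omega)]
          exact hrr
        · rw [pmax_succ xs l (by omega)]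
          exact max_le (le_trans (le_of_lt hcond) (smax_anti xs (by omega) hr))
            (getD_le_smax xs (l + 1) (by omega))
        · intro i hi
          rw [getD_set res (l + 1) i _ (by omega), if_neg (by omega)]
          rcases Nat.lt_or_ge i l with h | h
          · exact hlo i h
          · have : i = l := by omega
            subst this
            rw [hl]
            exact (min_eq_left hpls).symm
        · intro i h1 h2
          rw [getD_set res (l + 1) i _ (by omega), if_neg (by omega)]
          exact hhi i h1 h2
      · rw [if_neg hcond]
        have hcond' : smax xs r ≤ pmax xs l := le_of_not_gt hcond
        have e2 : (r : Int) - 1 = ((r - 1 : Nat) : Int) := by omega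
        rw [e2]
        have e4 : ((r - 1 : Nat) : Int) + 1 = (r : Int) := by omega
        rw [e4]
        simp only [PySem.List.pyGetD_natCast, PySem.List.pySetD_natCast]
        rw [hrr]
        have hr1 : r - 1 + 1 = r := by omega
        have hv : max (res.getD (r - 1) 0) (smax xs r) = smax xs (r - 1) := by
          rw [hmid (r - 1) (by omega) (by omega), smax_eq xs (r - 1) (by omega), hr1]
        rw [hv]
        refine ih l (r - 1) (res.set (r - 1) (smax xs (r - 1))) (by omega)
          (by rw [List.length_set]; exact hlen) (by omega) (by omega) ?_ ?_ ?_ hpls ?_ ?_ ?_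
        · intro i h1 h2
          rw [getD_set res (r - 1) i _ (by omega), if_neg (by omega)]
          exact hmid i h1 (by omega)
        · rw [getD_set res (r - 1) l _ (by omega), if_neg (by omega)]
          exact hl
        · rw [getD_set res (r - 1) (r - 1) _ (by omega), if_pos rfl]
        · rw [smax_eq xs (r - 1) (by omega), hr1]
          exact max_le (getD_le_pmax xs (r - 1) (by omega))
            (le_trans hcond' (pmax_mono xs (by omega)))
        · intro i hi
          rw [getD_set res (r - 1) i _ (by omega), if_neg (by omega)]
          exact hlo i hi
        · intro i h1 h2
          rw [getD_set res (r - 1) i _ (by omega), if_neg (by omega)]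
          rcases Nat.lt_or_ge r i with h | h
          · exact hhi i h h2
          · have : i = r := by omega
            subst this
            rw [hrr]
            exact (min_eq_right hsrp).symm
    · -- loop exits: r = l + 1
      rw [createMaxLoopA, dif_neg (by omega : ¬ (l : Int) < (r : Int) - 1)]
      apply List.ext_getElem (by rw [hlen, alt_length])
      intro i h1 h2
      have hi : i < xs.length := by rw [← hlen]; exact h1
      rw [← List.getD_eq_getElem res 0 h1, ← List.getD_eq_getElem _ 0 h2,
        alt_getD xs i hi]
      rcases Nat.lt_or_ge i l with h | h
      · exact hlo i h
      · by_cases hil : i = l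
        · subst hil
          rw [hl]
          exact (min_eq_left hpls).symm
        · by_cases hir : i = r
          · subst hir
            rw [hrr]
            exact (min_eq_right hsrp).symm
          · have : r < i := by omega
            rw [hhi i this hi]

lemma createMax_eq_of_two_le (xs : List Int) (hxs : 2 ≤ xs.length) :
    create_max_map_2d xs = create_max_map_2d_alt xs := by
  rw [create_max_map_2d]
  have hc : ((xs.length : Int) - 1) = ((xs.length - 1 : Nat) : Int) := by omega
  have h0 : (0 : Int) = ((0 : Nat) : Int) := rfl
  rw [hc, h0]
  have hne : xs ≠ [] := by intro h; rw [h] at hxs; simp at hxs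
  exact loopA_eq xs (xs.length - 1) 0 (xs.length - 1) xs rfl rfl (by omega) (by omega)
    (fun _ _ _ => rfl)
    (pmax_zero xs hne).symm
    (smax_last xs xs.length rfl (by omega)).symm
    (by rw [pmax_zero xs hne]; exact getD_le_smax xs 0 (by omega))
    (by rw [smax_last xs xs.length rfl (by omega)]
        exact getD_le_pmax xs (xs.length - 1) (by omega))
    (fun i hi => absurd hi (Nat.not_lt_zero i))
    (fun i h1 h2 => absurd h1 (by omega))

-- ===== VERDICT (by name: the statement is the Claim_ definition above) =====
theorem create_max_map_2d_spec : Claim_equal_create_max_map_2d := by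
  intro trees _
  show create_max_map_2d trees = create_max_map_2d_alt trees
  rcases trees with _ | ⟨x, _ | ⟨y, t⟩⟩
  · rw [create_max_map_2d, createMaxLoopA, dif_neg (by norm_num)]
    rfl
  · rw [create_max_map_2d,
      show ((([x] : List Int).length : Int) - 1) = 0 by simp,
      createMaxLoopA, dif_neg (by norm_num)]
    show [x] = create_max_map_2d_alt [x]
    simp [create_max_map_2d_alt, scanMaxB]
  · exact createMax_eq_of_two_le (x :: y :: t) (by simp)
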